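-- pv_equiv track=rewrite | github.com/UWPCE-PythonCert-ClassRepos/SP_Online_PY210 | students/mattcasari/lesson01/warmup-2/string_bits.py | string_bits
-- ===== SOURCE A (Python) =====
-- def string_bits(str):
--     temp = ''
--     count = 1
--     for s in str:
--         if count % 2 == 1:
--             temp += s
--         count += 1
--     return temp
-- ===== SOURCE B (Python) =====
-- def string_bits(str):
--     return str[::2]
-- ===== Notes on version B (the rewrite author's own statement) =====
-- stated objective: idiomatic
-- what changed: Replaces the loop with a parity counter and string accumulator by a single extended slice str[::2] that reads only the even indices.
import Mathlib
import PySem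

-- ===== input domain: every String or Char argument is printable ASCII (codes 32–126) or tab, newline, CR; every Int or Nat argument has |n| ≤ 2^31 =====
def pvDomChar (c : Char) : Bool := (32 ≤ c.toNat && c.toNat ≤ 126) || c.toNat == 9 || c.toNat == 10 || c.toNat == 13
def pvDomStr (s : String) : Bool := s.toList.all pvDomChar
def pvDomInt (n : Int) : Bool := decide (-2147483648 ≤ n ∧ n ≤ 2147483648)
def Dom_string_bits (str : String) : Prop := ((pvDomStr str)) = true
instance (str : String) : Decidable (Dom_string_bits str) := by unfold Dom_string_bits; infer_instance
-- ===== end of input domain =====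

-- B replaces the counter-and-accumulator loop by the single extended slice str[::2].
-- ===== PORT A =====
def string_bits (str : String) : String :=
  (str.toList.foldl
    (fun (st : String × Int) s =>
      (if st.2 % 2 == 1 then st.1.push s else st.1, st.2 + 1))
    ("", 1)).1

-- ===== PORT B =====
-- B returns str[::2]; step 2 is never 0 so slice? always returns some; getD "" only totalizes.
def string_bits_alt (str : String) : String :=
  (PySem.Str.slice? str none none 2).getD ""
-- ===== PRECONDITION & SPEC =====
def Spec_string_bits (str : String) (out : String) : Prop := out = string_bits_alt str
instance (str : String) (out : String) : Decidable (Spec_string_bits str out) := by unfold Spec_string_bits; infer_instance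

-- ===== CLAIM (what is proved, stated in full; the proofs are below) =====
def Claim_equal_string_bits : Prop := ∀ (str : String), Dom_string_bits str → Spec_string_bits str (string_bits str)

-- ===== LEMMAS AND PROOFS =====
mutual
def pvEvens : List Char → List Char
  | [] => []
  | a :: l => a :: pvOdds l
def pvOdds : List Char → List Char
  | [] => []
  | _ :: l => pvEvens l
end

theorem pv_push_ofList (acc : String) (a : Char) (l : List Char) :
    (acc.push a) ++ String.ofList l = acc ++ String.ofList (a :: l) := by
  apply String.ext
  simp

theorem pv_fold_inv (l : List Char) (acc : String) (c : Int) :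
    (l.foldl
      (fun (st : String × Int) s =>
        (if st.2 % 2 = 1 then st.1.push s else st.1, st.2 + 1))
      (acc, c)).1
    = acc ++ String.ofList (if c % 2 = 1 then pvEvens l else pvOdds l) := by
  induction l generalizing acc c with
  | nil =>
    split <;> (apply String.ext; simp [pvEvens, pvOdds])
  | cons a l ih =>
    by_cases h : c % 2 = 1
    · have h' : (c + 1) % 2 ≠ 1 := by omega
      simp only [List.foldl_cons, h, if_true]
      rw [ih, if_neg h']
      simp only [pvEvens]
      exact pv_push_ofList acc a (pvOdds l)
    · have h' : (c + 1) % 2 = 1 := by omega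
      simp only [List.foldl_cons, h, if_false]
      rw [ih, if_pos h']
      simp only [pvOdds]

theorem pv_filterMap_parity (l : List Char) :
    List.filterMap (fun k => l[2 * k]?) (List.range ((l.length + 1) / 2)) = pvEvens l
    ∧ List.filterMap (fun k => l[2 * k + 1]?) (List.range (l.length / 2)) = pvOdds l := by
  induction l with
  | nil => simp [pvEvens, pvOdds]
  | cons a l ih =>
    constructor
    · have hn : ((a :: l).length + 1) / 2 = l.length / 2 + 1 := by
        simp only [List.length_cons]; omega
      rw [hn, List.range_succ_eq_map, List.filterMap_cons, List.filterMap_map]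
      have hf : ∀ k : Nat, (a :: l)[2 * (k + 1)]? = l[2 * k + 1]? := by
        intro k
        have h2 : 2 * (k + 1) = (2 * k + 1) + 1 := by omega
        rw [h2, List.getElem?_cons_succ]
      simp only [Function.comp, Nat.succ_eq_add_one, hf]
      simp [pvEvens, ih.2]
    · have hn : (a :: l).length / 2 = (l.length + 1) / 2 := by
        simp only [List.length_cons]
      rw [hn]
      have hf : ∀ k : Nat, (a :: l)[2 * k + 1]? = l[2 * k]? := by
        intro k; rw [List.getElem?_cons_succ]
      simp only [hf]
      simpa [pvOdds] using ih.1

theorem pv_slice2 (l : List Char) :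
    PySem.List.slice? l none none 2 = some (pvEvens l) := by
  have key := (pv_filterMap_parity l).1
  simp only [PySem.List.slice?, PySem.List.sliceIndices]
  norm_num
  have hc : (if 0 < l.length then (((l.length:Int) + 2 - 1) / 2).toNat else 0)
      = (l.length + 1) / 2 := by
    split <;> omega
  have hf : ∀ k : Nat, l[((2 * (k:Int)).toNat)]? = l[2 * k]? := by
    intro k
    have h2 : (2 * (k:Int)).toNat = 2 * k := by omega
    rw [h2]
  simp only [hc, hf]
  exact key

theorem pv_alt_eq (str : String) : string_bits_alt str = String.ofList (pvEvens str.toList) := by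
  simp [string_bits_alt, PySem.Str.slice?, pv_slice2]

-- ===== VERDICT (by name: the statement is the Claim_ definition above) =====
theorem string_bits_spec : Claim_equal_string_bits := by
  intro str _
  show string_bits str = string_bits_alt str
  have hp : string_bits str
      = (str.toList.foldl
          (fun (st : String × Int) s =>
            (if st.2 % 2 = 1 then st.1.push s else st.1, st.2 + 1))
          ("", 1)).1 := by
    simp [string_bits]
  rw [hp, pv_fold_inv, pv_alt_eq]
  norm_num
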